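-- pv_equiv track=rewrite | github.com/triandicAnt/Formatme | constant.py | get_bracket_count
-- ===== SOURCE A (Python) =====
-- QUOTE = '\''
--
-- def get_bracket_count(line, open_bracket, close_bracket):
--     """
--     @brief      Gets the parenthesis count.
--
--     @param      line  The line
--
--     @return     The parenthesis count.
--     """
--     open_count = 0
--     close_count = 0
--     quote_flag = False
--     index_stack = []
--
--     for idx, char in enumerate(line):
--         if char == QUOTE:
--             quote_flag = not quote_flag
--         if quote_flag:
--             continue
--         elif char == open_bracket:
--             open_count += 1
--         elif char == close_bracket:
--             close_count += 1
--     return (open_count, close_count)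
-- ===== SOURCE B (Python) =====
-- QUOTE = '\''
--
-- def get_bracket_count(line, open_bracket, close_bracket):
--     """Split on quotes: even-indexed segments are outside quotes; count brackets there."""
--     open_count = 0
--     close_count = 0
--     for i, seg in enumerate(line.split(QUOTE)):
--         if i % 2:  # odd-indexed segments lie inside quotes
--             continue
--         for ch in seg:
--             if ch == open_bracket:
--                 open_count += 1
--             elif ch == close_bracket:
--                 close_count += 1
--     return (open_count, close_count)
-- ===== Notes on version B (the rewrite author's own statement) =====
-- stated objective: idiomatic
-- what changed: Replaced the stateful per-character quote-flag scan with an idiomatic split on the quote character: brackets are counted only in the even-indexed segments of line.split("'"), which are exactly the text outside quotes.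
-- outside the precondition, e.g. on get_bracket_count("'a'", "'", ')'): A returns (1, 0), B returns (0, 0)
import Mathlib
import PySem

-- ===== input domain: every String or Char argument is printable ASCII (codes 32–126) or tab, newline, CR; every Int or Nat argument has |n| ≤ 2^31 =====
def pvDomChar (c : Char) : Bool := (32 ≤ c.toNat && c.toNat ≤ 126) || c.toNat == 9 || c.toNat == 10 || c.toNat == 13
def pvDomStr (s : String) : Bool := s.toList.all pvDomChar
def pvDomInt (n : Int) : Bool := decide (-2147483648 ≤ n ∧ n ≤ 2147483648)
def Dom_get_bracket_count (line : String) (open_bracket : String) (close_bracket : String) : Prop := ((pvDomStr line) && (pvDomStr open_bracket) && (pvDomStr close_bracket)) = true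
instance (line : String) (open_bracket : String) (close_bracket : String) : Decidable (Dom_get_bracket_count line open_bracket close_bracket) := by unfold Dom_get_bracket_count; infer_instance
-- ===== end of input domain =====

-- B replaces A's stateful per-character quote-flag scan by splitting the line on the quote
-- character and counting brackets in the even-indexed (outside-quote) segments (idiomatic).


-- ===== PORT A =====
-- the body of A's for-loop: toggle the flag on a quote, skip while inside quotes,
-- else an elif chain on open_bracket/close_bracket (the char is a 1-char Python string)
def gbcStepA (open_bracket close_bracket : String) (s : Int × Int × Bool) (char : Char) : Int × Int × Bool :=
  let quote_flag := if char = '\'' then !s.2.2 else s.2.2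
  if quote_flag then (s.1, s.2.1, quote_flag)
  else if String.ofList [char] = open_bracket then (s.1 + 1, s.2.1, quote_flag)
  else if String.ofList [char] = close_bracket then (s.1, s.2.1 + 1, quote_flag)
  else (s.1, s.2.1, quote_flag)

def get_bracket_count (line : String) (open_bracket : String) (close_bracket : String) : Int × Int :=
  -- open_count = 0; close_count = 0; quote_flag = False; for idx, char in enumerate(line): …
  -- (index_stack is dead code in A and idx is unused by the loop body)
  let r := (PySem.List.enumerate line.toList).foldl
    (fun s p => gbcStepA open_bracket close_bracket s p.2) (0, 0, false)
  (r.1, r.2.1)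

-- ===== PORT B =====
-- the inner 'for ch in seg' loop of B: elif chain counting brackets in one segment
def gbcCountSeg (open_bracket close_bracket : String) (s : Int × Int) (seg : List Char) : Int × Int :=
  seg.foldl (fun t ch =>
    if String.ofList [ch] = open_bracket then (t.1 + 1, t.2)
    else if String.ofList [ch] = close_bracket then (t.1, t.2 + 1)
    else t) s

def get_bracket_count_alt (line : String) (open_bracket : String) (close_bracket : String) : Int × Int :=
  -- for i, seg in enumerate(line.split("'")): if i % 2: continue; for ch in seg: …
  -- (line.split("'") on the 1-char separator is ported as List.splitOn on the code points)
  (PySem.List.enumerate (line.toList.splitOn '\'')).foldl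
    (fun s p => if PySem.Int.mod p.1 2 ≠ 0 then s
                else gbcCountSeg open_bracket close_bracket s p.2) (0, 0)

-- ===== PRECONDITION & SPEC =====
-- Pre_ excludes calls in which open_bracket or close_bracket is the quote character "'" itself
-- while the line contains a quote pair: there the same character would be both the quote
-- delimiter and a counted bracket, no behaviour is specified, and A (which counts each closing
-- quote as a bracket) and B (which treats every quote as a delimiter only) defensibly disagree.
def Pre_get_bracket_count (line : String) (open_bracket : String) (close_bracket : String) : Prop :=
  (open_bracket = "'" ∨ close_bracket = "'") → line.toList.count '\'' ≤ 1
instance (line : String) (open_bracket : String) (close_bracket : String) : Decidable (Pre_get_bracket_count line open_bracket close_bracket) := by unfold Pre_get_bracket_count; infer_instance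

def pvWitness_get_bracket_count : String × String × String := ("a('b')c", "(", ")")

def Spec_get_bracket_count (line : String) (open_bracket : String) (close_bracket : String) (out : Int × Int) : Prop := out = get_bracket_count_alt line open_bracket close_bracket
instance (line : String) (open_bracket : String) (close_bracket : String) (out : Int × Int) : Decidable (Spec_get_bracket_count line open_bracket close_bracket out) := by unfold Spec_get_bracket_count; infer_instance

-- ===== CLAIM (what is proved, stated in full; the proofs are below) =====
def Claim_equal_get_bracket_count : Prop := ∀ (line : String) (open_bracket : String) (close_bracket : String), Dom_get_bracket_count line open_bracket close_bracket → Pre_get_bracket_count line open_bracket close_bracket → Spec_get_bracket_count line open_bracket close_bracket (get_bracket_count line open_bracket close_bracket)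

-- ===== LEMMAS AND PROOFS =====

-- the even-indexed (b = false) resp. odd-indexed (b = true) elements of a list
def pickSegs : Bool → List (List Char) → List (List Char)
  | _, [] => []
  | true, _ :: r => pickSegs false r
  | false, a :: r => a :: pickSegs true r

-- one character of B's inner elif chain
def chStep (ob cb : String) (t : Int × Int) (ch : Char) : Int × Int :=
  if String.ofList [ch] = ob then (t.1 + 1, t.2)
  else if String.ofList [ch] = cb then (t.1, t.2 + 1)
  else t

theorem quote_str : (String.ofList ['\''] : String) = "'" := rfl

theorem enum_cons {α : Type} (x : α) (r : List α) (n : Int) :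
    PySem.List.enumerate (x :: r) n = (n, x) :: PySem.List.enumerate r (n + 1) := rfl

theorem gbcCountSeg_cons (ob cb : String) (s : Int × Int) (x : Char) (seg : List Char) :
    gbcCountSeg ob cb s (x :: seg) = gbcCountSeg ob cb (chStep ob cb s x) seg := by
  simp only [gbcCountSeg, chStep, List.foldl_cons]

theorem stepA_q_false (ob cb : String) (o c : Int) :
    gbcStepA ob cb (o, c, false) '\'' = (o, c, true) := by
  simp [gbcStepA]

theorem stepA_q_true (ob cb : String) (h1 : ob ≠ "'") (h2 : cb ≠ "'") (o c : Int) :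
    gbcStepA ob cb (o, c, true) '\'' = (o, c, false) := by
  have hob : String.ofList ['\''] ≠ ob := by rw [quote_str]; exact fun h => h1 h.symm
  have hcb : String.ofList ['\''] ≠ cb := by rw [quote_str]; exact fun h => h2 h.symm
  simp [gbcStepA, hob, hcb]

theorem stepA_nq_true (ob cb : String) {x : Char} (hx : x ≠ '\'') (o c : Int) :
    gbcStepA ob cb (o, c, true) x = (o, c, true) := by
  simp [gbcStepA, hx]

theorem stepA_nq_false (ob cb : String) {x : Char} (hx : x ≠ '\'') (o c : Int) :
    gbcStepA ob cb (o, c, false) x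
      = ((chStep ob cb (o, c) x).1, (chStep ob cb (o, c) x).2, false) := by
  simp only [gbcStepA, chStep, if_neg hx]
  split_ifs <;> simp_all

-- a foldl over enumerate whose body ignores the index is a foldl over the list
theorem foldl_enumerate_snd {β γ : Type} (g : β → γ → β) :
    ∀ (cs : List γ) (n : Int) (s : β),
      (PySem.List.enumerate cs n).foldl (fun s p => g s p.2) s = cs.foldl g s := by
  intro cs
  induction cs with
  | nil => intro n s; rfl
  | cons x r ih => intro n s; rw [enum_cons, List.foldl_cons, List.foldl_cons]; exact ih _ _

theorem pymod_two (n : Nat) : PySem.Int.mod (n : Int) 2 = ((n % 2 : Nat) : Int) := by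
  simp only [PySem.Int.mod, Int.fmod_eq_emod]
  have : ((0:Int) ≤ 2 ∨ (2:Int) ∣ (n:Int)) := Or.inl (by norm_num)
  rw [if_pos this]
  omega

-- B's outer loop keeps exactly the even-indexed segments
theorem foldl_enumerate_parity {β : Type} (g : β → List Char → β) :
    ∀ (segs : List (List Char)) (n : Nat) (s : β),
      (PySem.List.enumerate segs (n : Int)).foldl
          (fun s p => if PySem.Int.mod p.1 2 ≠ 0 then s else g s p.2) s
        = (pickSegs (n % 2 == 1) segs).foldl g s := by
  intro segs
  induction segs with
  | nil => intro n s; cases h : (n % 2 == 1) <;> simp [PySem.List.enumerate, pickSegs]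
  | cons a r ih =>
    intro n s
    rw [enum_cons, List.foldl_cons]
    have hcast : ((n : Int) + 1) = ((n + 1 : Nat) : Int) := by push_cast; ring
    rcases Nat.even_or_odd n with he | ho
    · have h2 : n % 2 = 0 := Nat.even_iff.mp he
      have h3 : (n + 1) % 2 = 1 := by omega
      have hc : ¬ (PySem.Int.mod ((n : Int), a).1 2 ≠ 0) := by
        show ¬ (PySem.Int.mod (n : Int) 2 ≠ 0)
        rw [pymod_two, h2]
        simp
      simp only [if_neg hc]
      rw [hcast, ih (n + 1) (g s a)]
      simp [pickSegs, h2, h3]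
    · have h2 : n % 2 = 1 := Nat.odd_iff.mp ho
      have h3 : (n + 1) % 2 = 0 := by omega
      have hc : PySem.Int.mod ((n : Int), a).1 2 ≠ 0 := by
        show PySem.Int.mod (n : Int) 2 ≠ 0
        rw [pymod_two, h2]
        simp
      simp only [if_pos hc]
      rw [hcast, ih (n + 1) s]
      simp [pickSegs, h2, h3]
theorem splitOn_cons_quote (r : List Char) :
    ('\'' :: r).splitOn '\'' = [] :: r.splitOn '\'' := by
  simp [List.splitOn, List.splitOnP_cons]

theorem splitOn_cons_nonquote {x : Char} (hx : x ≠ '\'') (r : List Char) (hd : List Char)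
    (tl : List (List Char)) (hr : r.splitOn '\'' = hd :: tl) :
    (x :: r).splitOn '\'' = (x :: hd) :: tl := by
  simp only [List.splitOn, List.splitOnP_cons] at hr ⊢
  rw [if_neg (by simp [hx]), hr]
  rfl

-- step of the RHS: consuming x in the current (outside) segment
theorem pick_false_foldl_cons (ob cb : String) (x : Char) (hd : List Char)
    (tl : List (List Char)) (s : Int × Int) :
    (pickSegs false ((x :: hd) :: tl)).foldl (gbcCountSeg ob cb) s
      = (pickSegs false (hd :: tl)).foldl (gbcCountSeg ob cb) (chStep ob cb s x) := by
  simp only [pickSegs, List.foldl_cons, gbcCountSeg_cons]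

-- core equivalence, quote-free-bracket case
theorem coreA (ob cb : String) (h1 : ob ≠ "'") (h2 : cb ≠ "'") :
    ∀ (cs : List Char) (b : Bool) (o c : Int),
      ((cs.foldl (gbcStepA ob cb) (o, c, b)).1, (cs.foldl (gbcStepA ob cb) (o, c, b)).2.1)
        = (pickSegs b (cs.splitOn '\'')).foldl (gbcCountSeg ob cb) (o, c) := by
  intro cs
  induction cs with
  | nil =>
    intro b o c
    cases b <;> simp [List.splitOn, List.splitOnP_nil, pickSegs, gbcCountSeg]
  | cons x r ih =>
    intro b o c
    by_cases hx : x = '\''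
    · subst hx
      rw [splitOn_cons_quote]
      cases b
      · rw [List.foldl_cons, stepA_q_false]
        simpa [pickSegs, gbcCountSeg] using ih true o c
      · rw [List.foldl_cons, stepA_q_true ob cb h1 h2]
        simpa [pickSegs] using ih false o c
    · obtain ⟨hd, tl, hr⟩ := List.exists_cons_of_ne_nil (List.splitOnP_ne_nil (· == '\'') r)
      have hrs : r.splitOn '\'' = hd :: tl := hr
      rw [splitOn_cons_nonquote hx r hd tl hrs]
      cases b
      · rw [List.foldl_cons, stepA_nq_false ob cb hx, pick_false_foldl_cons, ← hrs]
        have := ih false (chStep ob cb (o, c) x).1 (chStep ob cb (o, c) x).2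
        simpa using this
      · rw [List.foldl_cons, stepA_nq_true ob cb hx]
        have hp : pickSegs true ((x :: hd) :: tl) = pickSegs true (hd :: tl) := by
          simp [pickSegs]
        rw [hp, ← hrs]
        exact ih true o c
-- inside quotes, a quote-free suffix is skipped entirely
theorem foldl_stepA_quoted (ob cb : String) :
    ∀ (cs : List Char), cs.count '\'' = 0 → ∀ (o c : Int),
      cs.foldl (gbcStepA ob cb) (o, c, true) = (o, c, true) := by
  intro cs
  induction cs with
  | nil => intro _ o c; rfl
  | cons x r ih =>
    intro h o c
    have hx : x ≠ '\'' := by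
      intro hc; subst hc; simp at h
    have hr : r.count '\'' = 0 := by
      simp [hx] at h; omega
    rw [List.foldl_cons, stepA_nq_true ob cb hx, ih hr]

-- core equivalence, at-most-one-quote case (no closing quote is ever reached)
theorem coreA2 (ob cb : String) :
    ∀ (cs : List Char), cs.count '\'' ≤ 1 → ∀ (o c : Int),
      ((cs.foldl (gbcStepA ob cb) (o, c, false)).1, (cs.foldl (gbcStepA ob cb) (o, c, false)).2.1)
        = (pickSegs false (cs.splitOn '\'')).foldl (gbcCountSeg ob cb) (o, c) := by
  intro cs
  induction cs with
  | nil => intro _ o c; simp [List.splitOn, List.splitOnP_nil, pickSegs, gbcCountSeg]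
  | cons x r ih =>
    intro hcnt o c
    by_cases hx : x = '\''
    · subst hx
      have hr0 : r.count '\'' = 0 := by
        simp at hcnt; omega
      have hrs : r.splitOn '\'' = [r] :=
        List.splitOnP_eq_single _ _ (by
          intro y hy hq
          have : y = '\'' := by simpa using hq
          subst this
          have := List.count_pos_iff.mpr hy
          omega)
      rw [splitOn_cons_quote, List.foldl_cons, stepA_q_false,
          foldl_stepA_quoted ob cb r hr0 o c, hrs]
      simp [pickSegs, gbcCountSeg]
    · have hrc : r.count '\'' ≤ 1 := by
        simp [hx] at hcnt ⊢
        omega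
      obtain ⟨hd, tl, hr⟩ := List.exists_cons_of_ne_nil (List.splitOnP_ne_nil (· == '\'') r)
      have hrs : r.splitOn '\'' = hd :: tl := hr
      rw [splitOn_cons_nonquote hx r hd tl hrs, List.foldl_cons, stepA_nq_false ob cb hx,
          pick_false_foldl_cons, ← hrs]
      have := ih hrc (chStep ob cb (o, c) x).1 (chStep ob cb (o, c) x).2
      simpa using this

theorem altB_eq (line ob cb : String) :
    get_bracket_count_alt line ob cb
      = (pickSegs false (line.toList.splitOn '\'')).foldl (gbcCountSeg ob cb) (0, 0) := by
  unfold get_bracket_count_alt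
  have := foldl_enumerate_parity (gbcCountSeg ob cb) (line.toList.splitOn '\'') 0 (0, 0)
  simpa using this

theorem portA_eq (line ob cb : String) :
    get_bracket_count line ob cb
      = (((line.toList.foldl (gbcStepA ob cb) (0, 0, false)).1),
         ((line.toList.foldl (gbcStepA ob cb) (0, 0, false)).2.1)) := by
  unfold get_bracket_count
  rw [foldl_enumerate_snd (gbcStepA ob cb) line.toList 0 (0, 0, false)]

-- ===== VERDICT (by name: the statement is the Claim_ definition above) =====
theorem get_bracket_count_spec : Claim_equal_get_bracket_count := by
  intro line ob cb _ hpre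
  unfold Spec_get_bracket_count
  rw [portA_eq, altB_eq]
  by_cases hq : ob = "'" ∨ cb = "'"
  · exact coreA2 ob cb line.toList (hpre hq) 0 0
  · push_neg at hq
    exact coreA ob cb hq.1 hq.2 line.toList false 0 0
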